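-- pv_equiv track=rewrite | github.com/zhaiyi000/x-evolve | test_admissible_set_ori.py | get_cyclic_permutations
-- ===== SOURCE A (Python) =====
-- import itertools
-- import itertools
--
-- def get_cyclic_permutations(partition: list[list[int]]) -> set[tuple[int, ...]]:
--     """Returns all combinations of cyclic permutations within `partition`."""
--     identity_permutation = list(range(sum(map(len, partition))))
--     permutations = set()
--     for cyclic_shifts in itertools.product(*[range(len(g)) for g in partition]):
--         permutation = list(identity_permutation)
--         for group, cyclic_shift in zip(partition, cyclic_shifts):
--             for i, x in enumerate(group):
--                 permutation[x] = group[(i + cyclic_shift) % len(group)]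
--         permutations.add(tuple(permutation))
--     return permutations
-- ===== SOURCE B (Python) =====
-- def get_cyclic_permutations(partition: list[list[int]]) -> set[tuple[int, ...]]:
--     """Returns all combinations of cyclic permutations within `partition`."""
--     if any(len(g) == 0 for g in partition):
--         return set()  # a zero-length group admits no cyclic shift
--     n = sum(len(g) for g in partition)
--     perms = {tuple(range(n))}
--     for g in partition:
--         L = len(g)
--         rotations = [[(x, g[(i + s) % L]) for i, x in enumerate(g)] for s in range(L)]
--         new = set()
--         for p in perms:
--             for rot in rotations:
--                 q = list(p)
--                 for x, v in rot:
--                     q[x] = v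
--                 new.add(tuple(q))
--         perms = new
--     return perms
-- ===== Notes on version B (the rewrite author's own statement) =====
-- stated objective: alternative
-- what changed: Replaces itertools.product over all per-group shift tuples (recomputing every full permutation from the identity) by an incremental fold over the groups that grows a running set of permutations, applying each group's precomputed cyclic-shift assignment lists to every permutation built so far; an empty group short-circuits to the empty set.
import Mathlib
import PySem

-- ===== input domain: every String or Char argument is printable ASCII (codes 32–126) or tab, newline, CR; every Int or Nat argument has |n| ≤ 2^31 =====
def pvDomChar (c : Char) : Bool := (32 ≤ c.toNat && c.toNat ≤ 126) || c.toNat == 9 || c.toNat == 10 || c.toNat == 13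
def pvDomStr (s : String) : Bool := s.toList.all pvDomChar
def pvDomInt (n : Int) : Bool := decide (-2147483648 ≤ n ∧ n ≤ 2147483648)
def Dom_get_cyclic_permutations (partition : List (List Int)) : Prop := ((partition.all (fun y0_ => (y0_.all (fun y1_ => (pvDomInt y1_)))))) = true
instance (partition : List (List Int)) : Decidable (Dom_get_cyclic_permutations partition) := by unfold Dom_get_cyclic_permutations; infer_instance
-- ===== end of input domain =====

-- B replaces itertools.product over all shift tuples by an incremental fold over the groups that
-- grows a set of permutations one group at a time (objective: alternative decomposition, same cost).


-- ===== PORT A =====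
-- itertools.product(*[range(len(g)) for g in partition]) is ported by hand as a foldr of
-- flatMap/map (leftmost factor varies slowest), exact for a list of ranges; the pyGetD default 0
-- is unreachable: when the enumerate loop body runs, (i + s) % len(g) is in range.
def get_cyclic_permutations (partition : List (List Int)) : List (List Int) :=
  let identity_permutation := PySem.List.pyRange 0 ((partition.map PySem.List.len).sum) 1
  let prods := (partition.map (fun g => PySem.List.pyRange 0 (PySem.List.len g) 1)).foldr
      (fun r acc => r.flatMap (fun s => acc.map (fun t => s :: t))) [[]]
  prods.foldl (fun permutations cyclic_shifts =>
      PySem.Set.add permutations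
        ((partition.zip cyclic_shifts).foldl
          (fun permutation gs =>
            (PySem.List.enumerate gs.1 0).foldl
              (fun permutation ix =>
                PySem.List.pySetD permutation ix.2
                  (PySem.List.pyGetD gs.1 (PySem.Int.mod (ix.1 + gs.2) (PySem.List.len gs.1)) 0))
              permutation)
          identity_permutation))
    PySem.Set.empty

-- ===== PORT B =====
def get_cyclic_permutations_alt (partition : List (List Int)) : List (List Int) :=
  if partition.any (fun g => PySem.List.len g == 0) then PySem.Set.empty
  else
    let n := (partition.map PySem.List.len).sum
    partition.foldl
      (fun perms g =>
        let L := PySem.List.len g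
        let rotations := (PySem.List.pyRange 0 L 1).map
          (fun s => (PySem.List.enumerate g 0).map
            (fun ix => (ix.2, PySem.List.pyGetD g (PySem.Int.mod (ix.1 + s) L) 0)))
        perms.foldl
          (fun new p =>
            rotations.foldl
              (fun new rot =>
                PySem.Set.add new (rot.foldl (fun q xv => PySem.List.pySetD q xv.1 xv.2) p))
              new)
          PySem.Set.empty)
      (PySem.Set.add PySem.Set.empty (PySem.List.pyRange 0 n 1))

-- ===== PRECONDITION & SPEC =====
-- Exactly where A returns: when every group is nonempty, a group element outside [-n, n)
-- (n = total number of elements) makes permutation[x] raise IndexError; when some group is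
-- empty the shift product is empty and A returns set() before any indexing.
def Pre_get_cyclic_permutations (partition : List (List Int)) : Prop :=
  (∃ g ∈ partition, g = []) ∨
  (∀ g ∈ partition, ∀ x ∈ g, -(partition.flatten.length : Int) ≤ x ∧ x < (partition.flatten.length : Int))
instance (partition : List (List Int)) : Decidable (Pre_get_cyclic_permutations partition) := by
  unfold Pre_get_cyclic_permutations; infer_instance

def pvWitness_get_cyclic_permutations : List (List Int) := [[0, 1], [2]]

def Spec_get_cyclic_permutations (partition : List (List Int)) (out : List (List Int)) : Prop := out = get_cyclic_permutations_alt partition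
instance (partition : List (List Int)) (out : List (List Int)) : Decidable (Spec_get_cyclic_permutations partition out) := by unfold Spec_get_cyclic_permutations; infer_instance

-- ===== CLAIM (what is proved, stated in full; the proofs are below) =====
def Claim_equal_get_cyclic_permutations : Prop := ∀ (partition : List (List Int)), Dom_get_cyclic_permutations partition → Pre_get_cyclic_permutations partition → Spec_get_cyclic_permutations partition (get_cyclic_permutations partition)

-- ===== LEMMAS AND PROOFS =====

-- Abstract pieces shared by the two ports.
def pvShifts (g : List Int) : List Int := PySem.List.pyRange 0 (PySem.List.len g) 1

def pvApply (p g : List Int) (s : Int) : List Int :=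
  (PySem.List.enumerate g 0).foldl
    (fun perm ix =>
      PySem.List.pySetD perm ix.2
        (PySem.List.pyGetD g (PySem.Int.mod (ix.1 + s) (PySem.List.len g)) 0))
    p

def pvBuild (p : List Int) (part : List (List Int)) (sh : List Int) : List Int :=
  (part.zip sh).foldl (fun perm gs => pvApply perm gs.1 gs.2) p

def pvProds (part : List (List Int)) : List (List Int) :=
  (part.map pvShifts).foldr (fun r acc => r.flatMap (fun s => acc.map (fun t => s :: t))) [[]]

def pvExpand (S : List (List Int)) (g : List Int) : List (List Int) :=
  S.flatMap (fun p => (pvShifts g).map (fun s => pvApply p g s))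

theorem pv_add_of_mem {α : Type} [BEq α] [LawfulBEq α] (s : PySem.Set α) (x : α)
    (h : x ∈ s) : PySem.Set.add s x = s := by
  simp [PySem.Set.add]; exact h

theorem pv_update_append {α : Type} [BEq α] (s : PySem.Set α) (u v : List α) :
    PySem.Set.update s (u ++ v) = PySem.Set.update (PySem.Set.update s u) v :=
  List.foldl_append

theorem pv_ofList_append {α : Type} [BEq α] (u v : List α) :
    PySem.Set.ofList (u ++ v) = PySem.Set.update (PySem.Set.ofList u) v := by
  rw [PySem.Set.ofList_eq_foldl, PySem.Set.ofList_eq_foldl]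
  exact List.foldl_append

theorem pv_update_of_subset {α : Type} [BEq α] [LawfulBEq α] (s : PySem.Set α) (v : List α)
    (h : ∀ y ∈ v, y ∈ s) : PySem.Set.update s v = s := by
  induction v generalizing s with
  | nil => rfl
  | cons y v ih =>
      have hy : y ∈ s := h y (by simp)
      show PySem.Set.update (PySem.Set.add s y) v = s
      rw [pv_add_of_mem s y hy]
      exact ih s (fun z hz => h z (by simp [hz]))

theorem pv_foldl_add_map {α β : Type} [BEq β] (l : List α) (f : α → β) (s : PySem.Set β) :
    l.foldl (fun acc x => PySem.Set.add acc (f x)) s = PySem.Set.update s (l.map f) := by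
  show _ = (l.map f).foldl PySem.Set.add s
  rw [List.foldl_map]

-- dedup/flatMap commutation: deduplicating the generators first does not change the set.
theorem pv_ofList_flatMap_ofList {α β : Type} [BEq α] [LawfulBEq α] [BEq β] [LawfulBEq β]
    (X : List α) (F : α → List β) :
    PySem.Set.ofList ((PySem.Set.ofList X).flatMap F) = PySem.Set.ofList (X.flatMap F) := by
  induction X using List.reverseRecOn with
  | nil => rfl
  | append_singleton X a ih =>
      by_cases ha : a ∈ X
      · have h1 : PySem.Set.ofList (X ++ [a]) = PySem.Set.ofList X := by
          rw [pv_ofList_append]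
          apply pv_update_of_subset
          intro y hy
          simp only [List.mem_singleton] at hy
          subst hy
          exact (PySem.Set.mem_ofList X y).mpr ha
        rw [h1, ih, List.flatMap_append, pv_ofList_append]
        refine Eq.symm (pv_update_of_subset _ _ ?_)
        intro y hy
        simp at hy
        exact (PySem.Set.mem_ofList _ y).mpr (List.mem_flatMap.mpr ⟨a, ha, hy⟩)
      · have h1 : PySem.Set.ofList (X ++ [a]) = PySem.Set.ofList X ++ [a] := by
          rw [pv_ofList_append]
          show PySem.Set.add (PySem.Set.ofList X) a = _
          simp [PySem.Set.add, PySem.Set.mem_ofList, ha]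
        rw [h1, List.flatMap_append, List.flatMap_append, pv_ofList_append, pv_ofList_append, ih]

-- B's inner double fold builds exactly Set.update init (pvExpand perms g).
theorem pv_inner_fold (perms : List (List Int)) (g : List Int) (init : PySem.Set (List Int)) :
    perms.foldl
      (fun new p =>
        ((PySem.List.pyRange 0 (PySem.List.len g) 1).map
          (fun s => (PySem.List.enumerate g 0).map
            (fun ix => (ix.2, PySem.List.pyGetD g (PySem.Int.mod (ix.1 + s) (PySem.List.len g)) 0)))).foldl
          (fun new rot =>
            PySem.Set.add new (rot.foldl (fun q xv => PySem.List.pySetD q xv.1 xv.2) p))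
          new)
      init
    = PySem.Set.update init (pvExpand perms g) := by
  induction perms generalizing init with
  | nil => rfl
  | cons p ps ih =>
      show List.foldl _ (List.foldl _ init _) ps = _
      rw [List.foldl_map, ih]
      have hblock : ∀ s : Int,
          ((PySem.List.enumerate g 0).map
            (fun ix => (ix.2, PySem.List.pyGetD g (PySem.Int.mod (ix.1 + s) (PySem.List.len g)) 0))).foldl
              (fun q xv => PySem.List.pySetD q xv.1 xv.2) p = pvApply p g s := by
        intro s; rw [List.foldl_map]; rfl
      have hf : (fun (new : PySem.Set (List Int)) (s : Int) => PySem.Set.add new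
            (((PySem.List.enumerate g 0).map
              (fun ix => (ix.2, PySem.List.pyGetD g (PySem.Int.mod (ix.1 + s) (PySem.List.len g)) 0))).foldl
              (fun q xv => PySem.List.pySetD q xv.1 xv.2) p))
          = (fun new s => PySem.Set.add new (pvApply p g s)) := by
        funext new s
        rw [hblock s]
      have : (PySem.List.pyRange 0 (PySem.List.len g) 1).foldl
          (fun new s => PySem.Set.add new
            (((PySem.List.enumerate g 0).map
              (fun ix => (ix.2, PySem.List.pyGetD g (PySem.Int.mod (ix.1 + s) (PySem.List.len g)) 0))).foldl
              (fun q xv => PySem.List.pySetD q xv.1 xv.2) p)) init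
          = PySem.Set.update init ((pvShifts g).map (fun s => pvApply p g s)) := by
        rw [hf, pv_foldl_add_map]
        rfl
      rw [this, show pvExpand (p :: ps) g
            = (pvShifts g).map (fun s => pvApply p g s) ++ pvExpand ps g from rfl,
          pv_update_append]

theorem pv_prods_cons (g : List Int) (rest : List (List Int)) :
    pvProds (g :: rest) = (pvShifts g).flatMap (fun s => (pvProds rest).map (fun t => s :: t)) := rfl

theorem pv_build_cons (p : List Int) (g : List Int) (rest : List (List Int)) (s : Int) (t : List Int) :
    pvBuild p (g :: rest) (s :: t) = pvBuild (pvApply p g s) rest t := rfl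

-- Main invariant of B's group-by-group fold.
theorem pv_main (part : List (List Int)) (S : List (List Int)) :
    part.foldl (fun perms g => PySem.Set.update ([] : PySem.Set (List Int)) (pvExpand perms g))
        (PySem.Set.ofList S)
    = PySem.Set.ofList (S.flatMap (fun p => (pvProds part).map (pvBuild p part))) := by
  induction part generalizing S with
  | nil =>
      show PySem.Set.ofList S = _
      have : S.flatMap (fun p => (pvProds []).map (pvBuild p [])) = S := by
        simp [pvProds, pvBuild]
      rw [this]
  | cons g rest ih =>
      show List.foldl _ (PySem.Set.update ([] : PySem.Set (List Int))
            (pvExpand (PySem.Set.ofList S) g)) rest = _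
      have hupd : ∀ l : List (List Int),
          PySem.Set.update ([] : PySem.Set (List Int)) l = PySem.Set.ofList l := by
        intro l; rw [PySem.Set.ofList_eq_foldl]; rfl
      rw [hupd, ih (pvExpand (PySem.Set.ofList S) g)]
      -- left side: generators pvExpand (ofList S) g; right side wants generators pvExpand S g
      have hdedup : PySem.Set.ofList
            ((pvExpand (PySem.Set.ofList S) g).flatMap (fun p => (pvProds rest).map (pvBuild p rest)))
          = PySem.Set.ofList
            ((pvExpand S g).flatMap (fun p => (pvProds rest).map (pvBuild p rest))) := by
        have h1 := pv_ofList_flatMap_ofList (pvExpand (PySem.Set.ofList S) g)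
          (fun p => (pvProds rest).map (pvBuild p rest))
        have h2 := pv_ofList_flatMap_ofList (pvExpand S g)
          (fun p => (pvProds rest).map (pvBuild p rest))
        have h3 : PySem.Set.ofList (pvExpand (PySem.Set.ofList S) g)
            = PySem.Set.ofList (pvExpand S g) := by
          unfold pvExpand
          exact pv_ofList_flatMap_ofList S (fun p => (pvShifts g).map (fun s => pvApply p g s))
        rw [← h1, ← h2, h3]
      rw [hdedup]
      congr 1
      unfold pvExpand
      rw [List.flatMap_assoc]
      apply List.flatMap_congr   -- pointwise equality of the generator functions
      intro p _
      rw [pv_prods_cons, List.flatMap_map, List.map_flatMap]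
      apply List.flatMap_congr
      intro s _
      rw [List.map_map]
      apply List.map_congr_left
      intro t _
      simp only [Function.comp]
      exact (pv_build_cons p g rest s t).symm

-- A's port in closed form.
theorem pv_A_eq (partition : List (List Int)) :
    get_cyclic_permutations partition
    = PySem.Set.ofList ((pvProds partition).map
        (pvBuild (PySem.List.pyRange 0 ((partition.map PySem.List.len).sum) 1) partition)) := by
  show (pvProds partition).foldl
      (fun permutations cyclic_shifts => PySem.Set.add permutations
        (pvBuild (PySem.List.pyRange 0 ((partition.map PySem.List.len).sum) 1) partition cyclic_shifts))
      PySem.Set.empty = _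
  rw [pv_foldl_add_map, PySem.Set.ofList_eq_foldl]
  rfl

-- If some group is empty, the shift product is empty.
theorem pv_prods_nil_of_empty (part : List (List Int)) (h : ∃ g ∈ part, g = []) :
    pvProds part = [] := by
  induction part with
  | nil => simp at h
  | cons g rest ih =>
      rcases h with ⟨g', hg', hnil⟩
      rcases List.mem_cons.mp hg' with heq | hmem
      · subst heq; subst hnil
        rw [pv_prods_cons]
        rfl
      · rw [pv_prods_cons, ih ⟨g', hmem, hnil⟩]
        simp

-- ===== VERDICT (by name: the statement is the Claim_ definition above) =====
theorem get_cyclic_permutations_spec : Claim_equal_get_cyclic_permutations := by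
  intro partition _ _
  show get_cyclic_permutations partition = get_cyclic_permutations_alt partition
  rw [pv_A_eq]
  unfold get_cyclic_permutations_alt
  by_cases hemp : partition.any (fun g => PySem.List.len g == 0)
  · rw [if_pos hemp]
    have : ∃ g ∈ partition, g = [] := by
      rcases List.any_eq_true.mp hemp with ⟨g, hg, hlen⟩
      refine ⟨g, hg, ?_⟩
      simp [PySem.List.len_eq] at hlen
      exact hlen
    rw [pv_prods_nil_of_empty partition this]
    rfl
  · rw [if_neg hemp]
    have hB : partition.foldl
        (fun perms g =>
          perms.foldl
            (fun new p =>
              ((PySem.List.pyRange 0 (PySem.List.len g) 1).map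
                (fun s => (PySem.List.enumerate g 0).map
                  (fun ix => (ix.2, PySem.List.pyGetD g (PySem.Int.mod (ix.1 + s) (PySem.List.len g)) 0)))).foldl
                (fun new rot =>
                  PySem.Set.add new (rot.foldl (fun q xv => PySem.List.pySetD q xv.1 xv.2) p))
                new)
            PySem.Set.empty)
        (PySem.Set.add PySem.Set.empty (PySem.List.pyRange 0 ((partition.map PySem.List.len).sum) 1))
      = partition.foldl (fun perms g => PySem.Set.update ([] : PySem.Set (List Int)) (pvExpand perms g))
          (PySem.Set.ofList [PySem.List.pyRange 0 ((partition.map PySem.List.len).sum) 1]) := by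
      congr 1
      funext perms g
      exact pv_inner_fold perms g PySem.Set.empty
    refine Eq.symm ?_
    calc _ = _ := hB
    _ = PySem.Set.ofList
          ([PySem.List.pyRange 0 ((partition.map PySem.List.len).sum) 1].flatMap
            (fun p => (pvProds partition).map (pvBuild p partition))) := pv_main _ _
    _ = _ := by simp
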